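-- pv_equiv track=rewrite | github.com/ZrjaK/algorithm | OJ/leetcode/903.DI 序列的有效排列.py | numPermsDISequence
-- ===== SOURCE A (Python) =====
-- def numPermsDISequence(s: str) -> int:
--     n = len(s)
--     dp = [[0] * (n+1) for _ in range(n+1)]
--     for j in range(n+1):
--         dp[0][j] = 1
--     for i in range(1, n+1):
--         for j in range(i+1):
--             if s[i-1] == "D":
--                 for k in range(j, i):
--                     dp[i][j] += dp[i-1][k]
--             else:
--                 for k in range(j):
--                     dp[i][j] += dp[i-1][k]
--     return sum(dp[n]) % int(1e9+7)
-- ===== SOURCE B (Python) =====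
-- def _prefix(acc, row):
--     # running prefix sums: out[j] = acc + sum(row[:j])
--     out = [acc]
--     for v in row:
--         acc += v
--         out.append(acc)
--     return out
--
--
-- def numPermsDISequence(s: str) -> int:
--     # One row of the DP, updated with prefix sums: O(n^2) instead of O(n^3).
--     row = [1]
--     for i, c in enumerate(s, 1):
--         pre = _prefix(0, row)
--         if c == "D":
--             row = [pre[i] - pre[j] for j in range(i + 1)]
--         else:
--             row = [pre[j] for j in range(i + 1)]
--     return sum(row) % (10 ** 9 + 7)
-- ===== Notes on version B (the rewrite author's own statement) =====
-- stated objective: faster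
-- what changed: Replaces A's (n+1)x(n+1) table with cubic triple-nested accumulation by a single-row DP that recomputes each row from the prefix sums of the previous row, so the inner k-loop disappears.
import Mathlib
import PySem

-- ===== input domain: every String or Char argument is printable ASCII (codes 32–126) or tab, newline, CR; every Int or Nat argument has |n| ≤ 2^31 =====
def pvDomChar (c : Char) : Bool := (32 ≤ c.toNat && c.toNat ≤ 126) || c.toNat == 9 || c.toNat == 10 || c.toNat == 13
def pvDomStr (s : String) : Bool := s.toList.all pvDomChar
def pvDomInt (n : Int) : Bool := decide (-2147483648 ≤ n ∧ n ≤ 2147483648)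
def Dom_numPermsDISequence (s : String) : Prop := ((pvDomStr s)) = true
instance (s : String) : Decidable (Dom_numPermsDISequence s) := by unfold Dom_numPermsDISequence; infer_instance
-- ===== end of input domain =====

-- B replaces A's three nested loops by a single-row DP over prefix sums of the previous row (objective: faster).

-- ===== PORT A =====
-- one entry dp[i][j] of A's table: the inner `for k in range(...)` accumulation into dp[i][j]
def aEntry (c : Char) (prev : List Int) (i j : Nat) : Int :=
  if c == 'D' then
    (List.range' j (i - j)).foldl (fun acc k => acc + prev.getD k 0) 0
  else
    (List.range j).foldl (fun acc k => acc + prev.getD k 0) 0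

-- row i of A's table (length n+1; entries with j ≥ i+1 stay 0, as in the Python)
def aStep (c : Char) (prev : List Int) (i n : Nat) : List Int :=
  (List.range (n + 1)).map (fun j => if j < i + 1 then aEntry c prev i j else 0)

def numPermsDISequence (s : String) : Int :=
  let cs := s.toList
  let n := cs.length
  let dp0 : List Int := List.replicate (n + 1) 1
  let dpn := (List.range n).foldl (fun prev t => aStep (cs.getD t ' ') prev (t + 1) n) dp0
  PySem.Int.mod dpn.sum 1000000007

-- ===== PORT B =====
-- B's `_prefix(acc, row)` running prefix sums
def preSums : Int → List Int → List Int
  | a, [] => [a]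
  | a, v :: vs => a :: preSums (a + v) vs

-- B's loop body: new row from the prefix sums of the previous row
def bStep (c : Char) (row : List Int) (i : Nat) : List Int :=
  let pre := preSums 0 row
  if c == 'D' then
    (List.range (i + 1)).map (fun j => pre.getD i 0 - pre.getD j 0)
  else
    (List.range (i + 1)).map (fun j => pre.getD j 0)

def numPermsDISequence_alt (s : String) : Int :=
  let cs := s.toList
  let fin := (cs.zipIdx 1).foldl (fun row p => bStep p.1 row p.2) [1]
  PySem.Int.mod fin.sum 1000000007

-- ===== PRECONDITION & SPEC =====
def Spec_numPermsDISequence (s : String) (out : Int) : Prop := out = numPermsDISequence_alt s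
instance (s : String) (out : Int) : Decidable (Spec_numPermsDISequence s out) := by unfold Spec_numPermsDISequence; infer_instance

-- ===== CLAIM (what is proved, stated in full; the proofs are below) =====
def Claim_equal_numPermsDISequence : Prop := ∀ (s : String), Dom_numPermsDISequence s → Spec_numPermsDISequence s (numPermsDISequence s)

-- ===== LEMMAS AND PROOFS =====

-- a foldl-add over indices is the sum of the looked-up values
theorem foldl_add_getD (l : List Int) (r : List Nat) (c : Int) :
    r.foldl (fun acc k => acc + l.getD k 0) c = c + (r.map (fun k => l.getD k 0)).sum := by
  induction r generalizing c with
  | nil => simp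
  | cons x xs ih => rw [List.foldl_cons, ih, List.map_cons, List.sum_cons]; ring

-- preSums is prefix sums, as index sums
theorem preSums_getD (l : List Int) (a : Int) (t : Nat) (ht : t ≤ l.length) :
    (preSums a l).getD t 0 = a + ((List.range t).map (fun k => l.getD k 0)).sum := by
  induction l generalizing a t with
  | nil =>
    have : t = 0 := by simpa using ht
    subst this; simp [preSums]
  | cons v vs ih =>
    cases t with
    | zero => simp [preSums]
    | succ t =>
      rw [show preSums a (v :: vs) = a :: preSums (a + v) vs from rfl, List.getD_cons_succ,
        ih (a + v) t (by simpa using ht), List.range_succ_eq_map, List.map_cons, List.map_map,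
        List.sum_cons]
      simp only [Function.comp_def, List.getD_cons_succ, List.getD_cons_zero]
      ring

theorem range_split (j i : Nat) (h : j ≤ i) :
    List.range i = List.range j ++ List.range' j (i - j) := by
  have h3 : List.range' 0 j ++ List.range' j (i - j) = List.range' 0 i := by
    have := List.range'_append (s := 0) (m := j) (n := i - j) (step := 1)
    simpa [Nat.add_sub_cancel' h] using this
  rw [List.range_eq_range', List.range_eq_range', ← h3]

theorem sum_getD_congr (r : List Nat) (l l' : List Int) (m : Nat)
    (hr : ∀ k ∈ r, k < m) (h : ∀ k, k < m → l.getD k 0 = l'.getD k 0) :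
    (r.map (fun k => l.getD k 0)).sum = (r.map (fun k => l'.getD k 0)).sum := by
  congr 1
  exact List.map_congr_left (fun k hk => h k (hr k hk))

theorem getD_map_range (f : Nat → Int) (t j : Nat) :
    ((List.range t).map f).getD j 0 = if j < t then f j else 0 := by
  split_ifs with h
  · rw [List.getD_eq_getElem _ _ (by simpa using h)]
    simp
  · exact List.getD_eq_default _ _ (by simpa using h)

theorem bStep_length (c : Char) (row : List Int) (i : Nat) :
    (bStep c row i).length = i + 1 := by
  unfold bStep; split <;> simp

-- entries of bStep agree with A's dp-entry when the previous rows agree on the region read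
theorem step_entry_eq (c : Char) (pa pb : List Int) (i j : Nat)
    (hj : j ≤ i) (hlen : i ≤ pb.length)
    (hagree : ∀ k, k < i → pb.getD k 0 = pa.getD k 0) :
    (bStep c pb i).getD j 0 = aEntry c pa i j := by
  have hpre : ∀ t, t ≤ i → (preSums 0 pb).getD t 0 =
      ((List.range t).map (fun k => pb.getD k 0)).sum := by
    intro t ht
    rw [preSums_getD pb 0 t (le_trans ht hlen)]; ring
  unfold bStep aEntry
  cases hc : (c == 'D') with
  | true =>
    simp only [if_true]
    rw [getD_map_range, if_pos (by omega), hpre i le_rfl, hpre j hj,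
      foldl_add_getD, zero_add]
    rw [range_split j i hj, List.map_append, List.sum_append]
    have := sum_getD_congr (List.range' j (i - j)) pb pa i
      (by intro k hk; have := List.mem_range'_1.mp hk; omega) hagree
    omega
  | false =>
    simp only [Bool.false_eq_true, if_false]
    rw [getD_map_range, if_pos (by omega), hpre j hj, foldl_add_getD, zero_add]
    exact sum_getD_congr (List.range j) pb pa i
      (by intro k hk; have := List.mem_range.mp hk; omega) hagree

theorem zipIdx_take_succ (cs : List Char) (m : Nat) (h : m < cs.length) :
    (cs.take (m + 1)).zipIdx 1 = (cs.take m).zipIdx 1 ++ [(cs.getD m ' ', m + 1)] := by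
  rw [List.take_add_one, List.zipIdx_append]
  simp [List.getElem?_eq_getElem h, Nat.min_eq_left (le_of_lt h), Nat.add_comm]

theorem aRows_length (cs : List Char) (n m : Nat) :
    ((List.range m).foldl (fun prev t => aStep (cs.getD t ' ') prev (t + 1) n)
      (List.replicate (n + 1) 1)).length = n + 1 := by
  induction m with
  | zero => simp
  | succ m ih =>
    rw [List.range_succ, List.foldl_append]
    simp [aStep]

-- the main loop invariant: B's row is the live part of A's row
theorem rows_agree (cs : List Char) (n : Nat) (hn : n = cs.length) :
    ∀ m, m ≤ n →
      (((cs.take m).zipIdx 1).foldl (fun row p => bStep p.1 row p.2) [1]).length = m + 1 ∧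
      ∀ k, k ≤ m →
        (((cs.take m).zipIdx 1).foldl (fun row p => bStep p.1 row p.2) [1]).getD k 0 =
        ((List.range m).foldl (fun prev t => aStep (cs.getD t ' ') prev (t + 1) n)
          (List.replicate (n + 1) 1)).getD k 0 := by
  intro m
  induction m with
  | zero =>
    intro _
    refine ⟨by simp, ?_⟩
    intro k hk
    have : k = 0 := Nat.le_zero.mp hk
    subst this
    simp
  | succ m ih =>
    intro hm
    obtain ⟨ihlen, ihagree⟩ := ih (by omega)
    rw [zipIdx_take_succ cs m (by omega), List.foldl_append, List.range_succ, List.foldl_append]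
    simp only [List.foldl_cons, List.foldl_nil]
    constructor
    · exact bStep_length _ _ _
    · intro k hk
      rw [step_entry_eq (cs.getD m ' ') _ _ (m + 1) k hk (by omega)
        (fun k' hk' => ihagree k' (by omega))]
      rw [show aStep (cs.getD m ' ')
          ((List.range m).foldl (fun prev t => aStep (cs.getD t ' ') prev (t + 1) n)
            (List.replicate (n + 1) 1)) (m + 1) n =
          (List.range (n + 1)).map (fun j => if j < m + 1 + 1 then
            aEntry (cs.getD m ' ')
              ((List.range m).foldl (fun prev t => aStep (cs.getD t ' ') prev (t + 1) n)
                (List.replicate (n + 1) 1)) (m + 1) j else 0) from rfl]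
      rw [getD_map_range, if_pos (by omega), if_pos (by omega)]

-- ===== VERDICT (by name: the statement is the Claim_ definition above) =====
theorem numPermsDISequence_spec : Claim_equal_numPermsDISequence := by
  intro s _
  unfold Spec_numPermsDISequence numPermsDISequence numPermsDISequence_alt
  simp only []
  set cs := s.toList with hcs
  set n := cs.length with hn
  obtain ⟨hlen, hagree⟩ := rows_agree cs n rfl n le_rfl
  rw [List.take_length] at hlen hagree
  congr 1
  have heq : List.foldl (fun row p => bStep p.1 row p.2) [1] (cs.zipIdx 1) =
      List.foldl (fun prev t => aStep (cs.getD t ' ') prev (t + 1) n)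
        (List.replicate (n + 1) 1) (List.range n) := by
    apply List.ext_getElem
    · rw [hlen, aRows_length]
    · intro k h1 h2
      rw [← List.getD_eq_getElem _ 0 h1, ← List.getD_eq_getElem _ 0 h2]
      exact hagree k (by rw [hlen] at h1; omega)
  rw [heq]
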